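-- pv_equiv track=rewrite | github.com/xredian/import_tracking | working_dir/track_uninstalled_modules_py2.7.py | enumeration
-- ===== SOURCE A (Python) =====
-- def enumeration(lst):
--     imports = []
--     for item in lst:
--         if item.find(' as ') == -1:
--             imports.append(item.split(', '))
--         else:
--             imports.append(item[:item.find(' as ')])
--     flatten = []
--     for lst in imports:
--         if type(lst) == str:
--             flatten.append(lst)
--         else:
--             flatten.extend(lst)
--     return flatten
-- ===== SOURCE B (Python) =====
-- def enumeration(lst):
--     flatten = []
--     for item in lst:
--         k = item.find(' as ')
--         if k == -1:
--             flatten.extend(item.split(', '))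
--         else:
--             flatten.append(item[:k])
--     return flatten
-- ===== Notes on version B (the rewrite author's own statement) =====
-- stated objective: simpler
-- what changed: B fuses A's two passes into one loop that builds the result list directly, eliminating the heterogeneous intermediate 'imports' list and the runtime type() dispatch.
import Mathlib
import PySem

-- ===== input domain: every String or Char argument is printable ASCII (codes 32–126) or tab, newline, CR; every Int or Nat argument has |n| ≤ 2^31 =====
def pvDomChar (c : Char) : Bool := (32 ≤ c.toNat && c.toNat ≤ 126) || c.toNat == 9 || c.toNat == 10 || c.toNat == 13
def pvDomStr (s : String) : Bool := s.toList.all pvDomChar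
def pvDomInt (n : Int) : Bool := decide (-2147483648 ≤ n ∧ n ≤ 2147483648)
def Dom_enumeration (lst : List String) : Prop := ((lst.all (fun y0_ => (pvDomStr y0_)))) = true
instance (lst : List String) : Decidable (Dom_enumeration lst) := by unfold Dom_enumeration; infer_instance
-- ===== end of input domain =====

-- B fuses A's two passes into one loop building the result directly, dropping the
-- heterogeneous intermediate list and the type() dispatch (objective: simpler).

-- ===== PORT A =====
-- A's 'imports' is heterogeneous (str or list); modelled as String ⊕ List String.
-- item.split(', ') never raises (sep ≠ ""), so split? always returns some; getD [] is exact.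
def enumeration (lst : List String) : List String :=
  let imports : List (String ⊕ List String) :=
    lst.foldl (fun acc item =>
      if PySem.Str.find item " as " = -1 then
        acc ++ [Sum.inr ((PySem.Str.split? item ", ").getD [])]
      else
        acc ++ [Sum.inl (PySem.Str.slice item none (some (PySem.Str.find item " as ")))]) []
  imports.foldl (fun acc l =>
    match l with
    | Sum.inl s => acc ++ [s]
    | Sum.inr xs => acc ++ xs) []

-- ===== PORT B =====
def enumeration_alt (lst : List String) : List String :=
  lst.foldl (fun flatten item =>
    let k := PySem.Str.find item " as "
    if k = -1 then flatten ++ (PySem.Str.split? item ", ").getD []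
    else flatten ++ [PySem.Str.slice item none (some k)]) []

-- ===== PRECONDITION & SPEC =====
def Spec_enumeration (lst : List String) (out : List String) : Prop := out = enumeration_alt lst
instance (lst : List String) (out : List String) : Decidable (Spec_enumeration lst out) := by unfold Spec_enumeration; infer_instance

-- ===== CLAIM (what is proved, stated in full; the proofs are below) =====
def Claim_equal_enumeration : Prop := ∀ (lst : List String), Dom_enumeration lst → Spec_enumeration lst (enumeration lst)

-- ===== LEMMAS AND PROOFS =====

-- the per-item contribution shared by both programs
def pvItem (item : String) : List String :=
  if PySem.Str.find item " as " = -1 then (PySem.Str.split? item ", ").getD []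
  else [PySem.Str.slice item none (some (PySem.Str.find item " as "))]

theorem pvAltEq (lst : List String) (acc : List String) :
    lst.foldl (fun flatten item =>
      let k := PySem.Str.find item " as "
      if k = -1 then flatten ++ (PySem.Str.split? item ", ").getD []
      else flatten ++ [PySem.Str.slice item none (some k)]) acc
    = acc ++ lst.flatMap pvItem := by
  induction lst generalizing acc with
  | nil => simp
  | cons x xs ih =>
    simp only [List.foldl_cons, List.flatMap_cons, ih, pvItem]
    split_ifs <;> simp

theorem pvBuildEq (lst : List String) (acc : List (String ⊕ List String)) :
    lst.foldl (fun acc item =>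
      if PySem.Str.find item " as " = -1 then
        acc ++ [Sum.inr ((PySem.Str.split? item ", ").getD [])]
      else
        acc ++ [Sum.inl (PySem.Str.slice item none (some (PySem.Str.find item " as ")))]) acc
    = acc ++ lst.map (fun item =>
        if PySem.Str.find item " as " = -1 then
          Sum.inr ((PySem.Str.split? item ", ").getD [])
        else
          Sum.inl (PySem.Str.slice item none (some (PySem.Str.find item " as ")))) := by
  induction lst generalizing acc with
  | nil => simp
  | cons x xs ih =>
    simp only [List.foldl_cons, List.map_cons, ih]
    split_ifs <;> simp

theorem pvFlatEq (imports : List (String ⊕ List String)) (acc : List String) :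
    imports.foldl (fun acc l =>
      match l with
      | Sum.inl s => acc ++ [s]
      | Sum.inr xs => acc ++ xs) acc
    = acc ++ imports.flatMap (fun l => match l with | Sum.inl s => [s] | Sum.inr xs => xs) := by
  induction imports generalizing acc with
  | nil => simp
  | cons x xs ih =>
    cases x <;> simp [ih]

-- ===== VERDICT (by name: the statement is the Claim_ definition above) =====
theorem enumeration_spec : Claim_equal_enumeration := by
  intro lst _
  unfold Spec_enumeration enumeration enumeration_alt
  rw [pvAltEq, pvBuildEq, pvFlatEq, List.nil_append, List.nil_append, List.flatMap_map]
  apply List.flatMap_congr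
  intro x _
  simp only [Function.comp, pvItem]
  split_ifs <;> rfl
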